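-- pv_equiv track=rewrite | github.com/MuteMuty/Sola | python/orbite.py | sirina_orbite
-- ===== SOURCE A (Python) =====
-- def lune(orbite):
--     slovar = {}
--     for key, value in orbite.items():
--         if value not in slovar:
--             slovar[value] = {key}
--         else:
--             slovar[value].add(key)
--     return slovar
--
-- def sirina_orbite(luna, razdalja, orbite):
--     if razdalja == 0:
--         return 1
--     slovar = lune(orbite)
--     if luna in slovar.keys():
--         resitev = list(slovar[luna])
--     else:
--         resitev = []
--     nov = []
--     counter = 1
--     while counter < razdalja:
--         counter += 1
--         for x in resitev:
--             if x in slovar.keys():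
--                 nov.extend(list(slovar[x]))
--         resitev.clear()
--         resitev = nov.copy()
--         nov.clear()
--     return len(resitev)
-- ===== SOURCE B (Python) =====
-- def sirina_orbite(luna, razdalja, orbite):
--     if razdalja == 0:
--         return 1
--     children = {}
--     for key, value in orbite.items():
--         children.setdefault(value, set()).add(key)
--
--     def count(node, d):
--         if d <= 0:
--             return 1
--         return sum(count(c, d - 1) for c in children.get(node, set()))
--
--     return sum(count(c, razdalja - 1) for c in children.get(luna, set()))
-- ===== Notes on version B (the rewrite author's own statement) =====
-- stated objective: alternative
-- what changed: Replaces A's level-by-level while-loop over explicit frontier lists with a recursive count(node, d) that sums counts over the children map, keeping the same parent-to-children dict.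
import Mathlib
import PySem

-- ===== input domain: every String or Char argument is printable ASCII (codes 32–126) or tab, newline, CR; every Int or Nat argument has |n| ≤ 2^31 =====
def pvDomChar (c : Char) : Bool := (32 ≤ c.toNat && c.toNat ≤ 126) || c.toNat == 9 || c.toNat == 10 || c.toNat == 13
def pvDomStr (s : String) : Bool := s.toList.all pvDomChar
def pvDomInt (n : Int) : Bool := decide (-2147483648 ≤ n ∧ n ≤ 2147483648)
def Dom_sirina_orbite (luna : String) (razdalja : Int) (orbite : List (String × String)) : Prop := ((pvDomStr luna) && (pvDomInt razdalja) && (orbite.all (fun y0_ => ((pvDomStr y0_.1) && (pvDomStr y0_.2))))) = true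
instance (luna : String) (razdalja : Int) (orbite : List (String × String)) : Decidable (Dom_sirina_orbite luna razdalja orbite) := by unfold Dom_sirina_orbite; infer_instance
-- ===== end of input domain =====

-- B replaces A's level-by-level frontier loop with a recursive per-node path count (alternative decomposition, same cost).

-- ===== PORT A =====
-- lune: value -> set of keys (parent -> set of children)
def lune (orbite : List (String × String)) : PySem.Dict String (PySem.Set String) :=
  orbite.foldl (fun slovar kv =>
    match slovar.get? kv.2 with
    | none => slovar.insert kv.2 (PySem.Set.ofList [kv.1])
    | some s => slovar.insert kv.2 (PySem.Set.add s kv.1)) PySem.Dict.empty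

-- one pass of the while-body: 'for x in resitev: if x in slovar: nov.extend(list(slovar[x]))'
def stepA (slovar : PySem.Dict String (PySem.Set String)) (resitev : List String) : List String :=
  resitev.foldl (fun nov x =>
    match slovar.get? x with
    | some s => nov ++ s
    | none => nov) []

-- the 'while counter < razdalja' loop (resitev is replaced by nov each pass)
def sirinaLoop (slovar : PySem.Dict String (PySem.Set String)) (counter razdalja : Int)
    (resitev : List String) : List String :=
  if counter < razdalja then
    sirinaLoop slovar (counter + 1) razdalja (stepA slovar resitev)
  else resitev
termination_by (razdalja - counter).toNat
decreasing_by omega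

def sirina_orbite (luna : String) (razdalja : Int) (orbite : List (String × String)) : Int :=
  if razdalja == 0 then 1
  else
    let slovar := lune orbite
    let resitev := match slovar.get? luna with
      | some s => (s : List String)
      | none => []
    ((sirinaLoop slovar 1 razdalja resitev).length : Int)

-- ===== PORT B =====
-- children map built with setdefault(value, set()).add(key)
def childrenB (orbite : List (String × String)) : PySem.Dict String (PySem.Set String) :=
  orbite.foldl (fun d kv =>
    d.insert kv.2 (PySem.Set.add (d.getD kv.2 PySem.Set.empty) kv.1)) PySem.Dict.empty

-- count(node, d): 1 at depth ≤ 0, else the sum of counts over node's children one level down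
def countB (ch : PySem.Dict String (PySem.Set String)) (node : String) (d : Int) : Int :=
  if d ≤ 0 then 1
  else ((ch.getD node PySem.Set.empty).map (fun c => countB ch c (d - 1))).sum
termination_by d.toNat
decreasing_by omega

def sirina_orbite_alt (luna : String) (razdalja : Int) (orbite : List (String × String)) : Int :=
  if razdalja == 0 then 1
  else
    let children := childrenB orbite
    ((children.getD luna PySem.Set.empty).map (fun c => countB children c (razdalja - 1))).sum

-- ===== PRECONDITION & SPEC =====
def Spec_sirina_orbite (luna : String) (razdalja : Int) (orbite : List (String × String)) (out : Int) : Prop := out = sirina_orbite_alt luna razdalja orbite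
instance (luna : String) (razdalja : Int) (orbite : List (String × String)) (out : Int) : Decidable (Spec_sirina_orbite luna razdalja orbite out) := by unfold Spec_sirina_orbite; infer_instance

-- ===== CLAIM (what is proved, stated in full; the proofs are below) =====
def Claim_equal_sirina_orbite : Prop := ∀ (luna : String) (razdalja : Int) (orbite : List (String × String)), Dom_sirina_orbite luna razdalja orbite → Spec_sirina_orbite luna razdalja orbite (sirina_orbite luna razdalja orbite)

-- ===== LEMMAS AND PROOFS =====

-- the two child maps coincide: A's not-in/insert-vs-add branches and B's setdefault-add do the same update
theorem lune_eq_childrenB (orbite : List (String × String)) : lune orbite = childrenB orbite := by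
  unfold lune childrenB
  congr 1
  funext d kv
  cases h : d.get? kv.2 with
  | none => simp [PySem.Dict.getD, h, PySem.Set.ofList, PySem.Set.add, PySem.Set.empty, PySem.Set.contains]
  | some s => simp [PySem.Dict.getD, h]

-- one frontier pass is the flatMap of the children lists
theorem stepA_eq (slovar : PySem.Dict String (PySem.Set String)) (L : List String) :
    stepA slovar L = L.flatMap (fun x => slovar.getD x PySem.Set.empty) := by
  unfold stepA
  have h : (fun (nov : List String) x =>
        match slovar.get? x with
        | some s => nov ++ s
        | none => nov) = fun nov x => nov ++ slovar.getD x PySem.Set.empty := by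
    funext nov x
    cases h : slovar.get? x <;> simp [PySem.Dict.getD, h, PySem.Set.empty]
  rw [h, PySem.List.foldl_append_eq_flatMap]
  simp

-- frontier length after the loop = sum over the frontier of recursive counts at the remaining depth
theorem sirinaLoop_length (slovar : PySem.Dict String (PySem.Set String))
    (counter razdalja : Int) (L : List String) :
    ((sirinaLoop slovar counter razdalja L).length : Int)
      = (L.map (fun c => countB slovar c (razdalja - counter))).sum := by
  fun_induction sirinaLoop slovar counter razdalja L
  case case1 counter L h ih =>
    rw [ih, stepA_eq]
    rw [List.map_flatMap]
    rw [show ((L.flatMap fun x => (slovar.getD x PySem.Set.empty).map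
          (fun c => countB slovar c (razdalja - (counter + 1))))
        = (L.map (fun x => (slovar.getD x PySem.Set.empty).map
          (fun c => countB slovar c (razdalja - (counter + 1))))).flatten) by simp [List.flatMap_def]]
    rw [List.sum_flatten, List.map_map]
    congr 1
    apply List.map_congr_left
    intro x _
    show (List.sum ∘ fun x => List.map (fun c => countB slovar c (razdalja - (counter + 1))) (slovar.getD x PySem.Set.empty)) x = countB slovar x (razdalja - counter)
    show ((slovar.getD x PySem.Set.empty).map
      (fun c => countB slovar c (razdalja - (counter + 1)))).sum = countB slovar x (razdalja - counter)
    rw [countB, if_neg (by omega)]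
    have e : razdalja - counter - 1 = razdalja - (counter + 1) := by ring
    rw [e]
  case case2 counter L h =>
    have hle : razdalja - counter ≤ 0 := by omega
    simp [countB, hle]

-- ===== VERDICT (by name: the statement is the Claim_ definition above) =====
theorem sirina_orbite_spec : Claim_equal_sirina_orbite := by
  intro luna razdalja orbite _
  show sirina_orbite luna razdalja orbite = sirina_orbite_alt luna razdalja orbite
  simp only [sirina_orbite, sirina_orbite_alt]
  by_cases h : razdalja = 0
  · simp [h]
  · rw [if_neg (by simpa using h), if_neg (by simpa using h)]
    rw [lune_eq_childrenB]
    have hinit : (match (childrenB orbite).get? luna with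
        | some s => (s : List String)
        | none => []) = (childrenB orbite).getD luna PySem.Set.empty := by
      cases hg : (childrenB orbite).get? luna <;> simp [PySem.Dict.getD, hg, PySem.Set.empty]
    rw [hinit, sirinaLoop_length]
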